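-- pv_equiv track=rewrite | github.com/Quique-E/aoc-2025 | ten.py | bfs
-- ===== SOURCE A (Python) =====
-- from collections import deque
--
-- def get_neighbors(pos, buttons):
--     for button in buttons:
--         new_state = pos[:]
--         for item in button:
--             new_state[item] = 1 if new_state[item] == 0 else 0
--         yield new_state, button
--
-- def bfs(start_position, goal, buttons):
--     queue = deque([(start_position, [])])
--     visited = {str(start_position)}
--
--     while queue:
--         current, directions = queue.popleft()
--
--         if current == goal:
--             return directions
--
--         for neighbor, direction in get_neighbors(current, buttons):
--             if str(neighbor) not in visited:
--                 visited.add(str(neighbor))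
--                 queue.append((neighbor, directions + [direction]))
--
--     return None
-- ===== SOURCE B (Python) =====
-- from collections import deque
--
-- def bfs(start_position, goal, buttons):
--     # BFS over states only; parent pointers in came_from, path rebuilt at the end.
--     start_key = str(start_position)
--     came_from = {}
--     queue = deque([start_position])
--     while queue:
--         current = queue.popleft()
--         if current == goal:
--             path = []
--             k = str(current)
--             while k != start_key:
--                 parent_key, button = came_from[k]
--                 path.append(button)
--                 k = parent_key
--             path.reverse()
--             return path
--         for button in buttons:
--             neighbor = current[:]
--             for item in button:
--                 neighbor[item] = 1 if neighbor[item] == 0 else 0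
--             key = str(neighbor)
--             if key != start_key and key not in came_from:
--                 came_from[key] = (str(current), button)
--                 queue.append(neighbor)
--     return None
-- ===== Notes on version B (the rewrite author's own statement) =====
-- stated objective: alternative
-- what changed: B's BFS queue holds bare states instead of (state, path) pairs: a came_from dict records (parent, button) at first discovery and the button path is reconstructed once by walking parent pointers back from the goal, instead of concatenating a fresh path list at every enqueue.
import Mathlib
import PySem

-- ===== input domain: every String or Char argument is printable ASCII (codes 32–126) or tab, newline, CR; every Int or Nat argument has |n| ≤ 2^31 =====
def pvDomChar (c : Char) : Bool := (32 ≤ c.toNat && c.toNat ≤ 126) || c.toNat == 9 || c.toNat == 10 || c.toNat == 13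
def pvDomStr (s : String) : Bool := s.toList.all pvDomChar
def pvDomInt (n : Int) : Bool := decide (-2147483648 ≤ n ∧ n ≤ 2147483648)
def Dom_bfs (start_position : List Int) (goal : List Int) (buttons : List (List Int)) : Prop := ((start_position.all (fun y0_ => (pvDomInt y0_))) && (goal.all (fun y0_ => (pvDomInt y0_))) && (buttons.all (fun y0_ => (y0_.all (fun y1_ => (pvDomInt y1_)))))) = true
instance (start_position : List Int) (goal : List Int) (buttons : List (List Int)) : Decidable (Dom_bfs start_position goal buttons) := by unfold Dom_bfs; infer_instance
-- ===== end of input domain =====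

-- B replaces A's queue of (state, path-so-far) pairs by a queue of bare states plus a
-- came_from parent-pointer dict, rebuilding the button path once at the end (objective: alternative).
-- Python's visited/came_from use str(state) keys; str is injective on lists of ints, so both
-- ports key directly on the state list — membership and lookup are exact.
-- Both loops' `while queue` is ported with a fuel counter 3^n + 1 (n = len(start)): every state ever
-- enqueued has each coordinate in {start[i], 0, 1}, so at most 3^n states are enqueued and the fuel
-- is never exhausted; both ports use the same counter.

-- ===== PORT A =====
-- inner loop of get_neighbors: new_state[item] = 1 if new_state[item] == 0 else 0 (IndexError → none)
def pvToggleA (pos : List Int) (button : List Int) : Option (List Int) :=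
  button.foldl (fun acc item => acc.bind (fun st =>
    match PySem.List.pyGet? st item with
    | none => none
    | some v => PySem.List.pySet? st item (if v = 0 then 1 else 0))) (some pos)

-- the `for neighbor, direction in get_neighbors(...)` loop: one button at a time (the generator is lazy)
def pvExpandA (current : List Int) (dirs : List (List Int)) (bs : List (List Int))
    (q : List (List Int × List (List Int))) (v : PySem.Set (List Int)) :
    Option (List (List Int × List (List Int)) × PySem.Set (List Int)) :=
  match bs with
  | [] => some (q, v)
  | b :: rest =>
    match pvToggleA current b with
    | none => none
    | some nb =>
      if nb ∈ v then pvExpandA current dirs rest q v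
      else pvExpandA current dirs rest (q ++ [(nb, dirs ++ [b])]) (PySem.Set.add v nb)

def pvLoopA (goal : List Int) (buttons : List (List Int)) :
    Nat → List (List Int × List (List Int)) → PySem.Set (List Int) → Option (List (List Int))
  | 0, _, _ => none
  | _ + 1, [], _ => none
  | f + 1, (current, dirs) :: rest, v =>
    if current = goal then some dirs
    else
      match pvExpandA current dirs buttons rest v with
      | none => none
      | some (q', v') => pvLoopA goal buttons f q' v'

def bfs (start_position : List Int) (goal : List Int) (buttons : List (List Int)) : Option (List (List Int)) :=
  pvLoopA goal buttons (3 ^ start_position.length + 1)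
    [(start_position, [])] (PySem.Set.add PySem.Set.empty start_position)

-- ===== PORT B =====
-- the reconstruction while-loop; fuel cf.size + 1 bounds the parent chain (each non-start key is a
-- distinct key of came_from); the final list.reverse() is applied at the loop's exit
def pvReconB (start : List Int) (cf : PySem.Dict (List Int) (List Int × List Int)) :
    Nat → List Int → List (List Int) → Option (List (List Int))
  | 0, _, _ => none
  | f + 1, k, path =>
    if k = start then some path.reverse
    else
      match cf.get? k with
      | none => none
      | some (pk, b) => pvReconB start cf f pk (path ++ [b])

def pvExpandB (start current : List Int) (bs : List (List Int))
    (q : List (List Int)) (cf : PySem.Dict (List Int) (List Int × List Int)) :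
    Option (List (List Int) × PySem.Dict (List Int) (List Int × List Int)) :=
  match bs with
  | [] => some (q, cf)
  | b :: rest =>
    -- neighbor = current[:] ; for item in b: neighbor[item] = 1 if neighbor[item] == 0 else 0
    match b.foldl (fun acc item => acc.bind (fun st =>
        match PySem.List.pyGet? st item with
        | none => none
        | some v => PySem.List.pySet? st item (if v = 0 then 1 else 0))) (some current) with
    | none => none
    | some nb =>
      if nb = start ∨ cf.contains nb = true then pvExpandB start current rest q cf
      else pvExpandB start current rest (q ++ [nb]) (cf.insert nb (current, b))

def pvLoopB (start goal : List Int) (buttons : List (List Int)) :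
    Nat → List (List Int) → PySem.Dict (List Int) (List Int × List Int) → Option (List (List Int))
  | 0, _, _ => none
  | _ + 1, [], _ => none
  | f + 1, current :: rest, cf =>
    if current = goal then pvReconB start cf (cf.size + 1) current []
    else
      match pvExpandB start current buttons rest cf with
      | none => none
      | some (q', cf') => pvLoopB start goal buttons f q' cf'

def bfs_alt (start_position : List Int) (goal : List Int) (buttons : List (List Int)) : Option (List (List Int)) :=
  pvLoopB start_position goal buttons (3 ^ start_position.length + 1) [start_position] PySem.Dict.empty

-- ===== PRECONDITION & SPEC =====
-- A raises IndexError iff start ≠ goal and some button holds an index outside range(-n, n)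
-- (every reached state has length n = len(start); if start = goal, A returns [] before expanding).
def Pre_bfs (start_position : List Int) (goal : List Int) (buttons : List (List Int)) : Prop :=
  start_position = goal ∨ ∀ b ∈ buttons, ∀ i ∈ b, PySem.Raise.InRange start_position.length i
instance (start_position : List Int) (goal : List Int) (buttons : List (List Int)) : Decidable (Pre_bfs start_position goal buttons) := by unfold Pre_bfs; infer_instance

def pvWitness_bfs : List Int × List Int × List (List Int) := ([0, 1], [1, 1], [[0], [1]])

def Spec_bfs (start_position : List Int) (goal : List Int) (buttons : List (List Int)) (out : Option (List (List Int))) : Prop := out = bfs_alt start_position goal buttons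
instance (start_position : List Int) (goal : List Int) (buttons : List (List Int)) (out : Option (List (List Int))) : Decidable (Spec_bfs start_position goal buttons out) := by unfold Spec_bfs; infer_instance

-- ===== CLAIM (what is proved, stated in full; the proofs are below) =====
def Claim_equal_bfs : Prop := ∀ (start_position : List Int) (goal : List Int) (buttons : List (List Int)), Dom_bfs start_position goal buttons → Pre_bfs start_position goal buttons → Spec_bfs start_position goal buttons (bfs start_position goal buttons)

-- ===== LEMMAS AND PROOFS =====

-- "recon succeeds with fuel cf.size+1 and returns p followed by the reversed accumulator"
def pvReconOK (start : List Int) (cf : PySem.Dict (List Int) (List Int × List Int))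
    (s : List Int) (p : List (List Int)) : Prop :=
  ∀ acc, pvReconB start cf (cf.size + 1) s acc = some (p ++ acc.reverse)

theorem pvRecon_mono (start : List Int) (cf : PySem.Dict (List Int) (List Int × List Int)) :
    ∀ (f f' : Nat), f ≤ f' → ∀ s acc r, pvReconB start cf f s acc = some r →
      pvReconB start cf f' s acc = some r := by
  intro f
  induction f with
  | zero => intro f' _ s acc r h; simp [pvReconB] at h
  | succ f ih =>
    intro f' hf s acc r h
    obtain ⟨f'', rfl⟩ : ∃ f'', f' = f'' + 1 := ⟨f' - 1, by omega⟩
    rw [pvReconB] at h ⊢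
    by_cases hs : s = start
    · rw [if_pos hs] at h ⊢; exact h
    · rw [if_neg hs] at h ⊢
      cases hg : cf.get? s with
      | none => rw [hg] at h; exact absurd h (by simp)
      | some pb =>
        obtain ⟨pk, bb⟩ := pb
        rw [hg] at h
        exact ih f'' (by omega) _ _ _ h

theorem pvRecon_insert (start nb : List Int) (x : List Int × List Int)
    (cf : PySem.Dict (List Int) (List Int × List Int)) (hnb : cf.contains nb = false) :
    ∀ (f : Nat) s acc r, pvReconB start cf f s acc = some r →
      pvReconB start (cf.insert nb x) f s acc = some r := by
  intro f
  induction f with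
  | zero => intro s acc r h; simp [pvReconB] at h
  | succ f ih =>
    intro s acc r h
    rw [pvReconB] at h ⊢
    by_cases hs : s = start
    · rw [if_pos hs] at h ⊢; exact h
    · rw [if_neg hs] at h ⊢
      cases hg : cf.get? s with
      | none => rw [hg] at h; exact absurd h (by simp)
      | some pb =>
        obtain ⟨pk, bb⟩ := pb
        have hne : s ≠ nb := by
          intro e; subst e
          rw [PySem.Dict.contains_eq_isSome_get?, hg] at hnb; simp at hnb
        rw [hg] at h
        rw [PySem.Dict.get?_insert_of_ne cf x hne, hg]
        exact ih _ _ _ h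

theorem pvReconOK_insert (start nb : List Int) (x : List Int × List Int)
    (cf : PySem.Dict (List Int) (List Int × List Int)) (hnb : cf.contains nb = false)
    (s : List Int) (p : List (List Int)) (h : pvReconOK start cf s p) :
    pvReconOK start (cf.insert nb x) s p := by
  intro acc
  have hsz : (cf.insert nb x).size = cf.size + 1 := by
    rw [PySem.Dict.size_insert, if_neg (by simp [hnb])]
  rw [hsz]
  exact pvRecon_mono start _ (cf.size + 1) (cf.size + 1 + 1) (by omega) s acc _
    (pvRecon_insert start nb x cf hnb (cf.size + 1) s acc _ (h acc))

theorem pvReconOK_new (start nb current : List Int) (b : List Int)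
    (cf : PySem.Dict (List Int) (List Int × List Int)) (hnb : cf.contains nb = false)
    (hns : nb ≠ start) (p : List (List Int)) (h : pvReconOK start cf current p) :
    pvReconOK start (cf.insert nb (current, b)) nb (p ++ [b]) := by
  intro acc
  have hsz : (cf.insert nb (current, b)).size = cf.size + 1 := by
    rw [PySem.Dict.size_insert, if_neg (by simp [hnb])]
  rw [hsz, pvReconB, if_neg hns, PySem.Dict.get?_insert_self]
  have h2 := pvRecon_insert start nb (current, b) cf hnb (cf.size + 1) current (acc ++ [b]) _
    (h (acc ++ [b]))
  show pvReconB start (cf.insert nb (current, b)) (cf.size + 1) current (acc ++ [b]) =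
    some (p ++ [b] ++ acc.reverse)
  rw [h2]
  simp

theorem pvReconOK_start (start : List Int) (cf : PySem.Dict (List Int) (List Int × List Int)) :
    pvReconOK start cf start [] := by
  intro acc
  simp [pvReconB]

-- lockstep invariant through one expansion (both generators consume the same buttons)
theorem pvExpand_lock (start current : List Int) (dirs : List (List Int)) :
    ∀ (bs : List (List Int)) (qA : List (List Int × List (List Int))) (v : PySem.Set (List Int))
      (qB : List (List Int)) (cf : PySem.Dict (List Int) (List Int × List Int)),
      qA.map Prod.fst = qB →
      (∀ s, s ∈ v ↔ (s = start ∨ cf.contains s = true)) →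
      (∀ sp ∈ qA, pvReconOK start cf sp.1 sp.2) →
      pvReconOK start cf current dirs →
      (pvExpandA current dirs bs qA v = none ∧ pvExpandB start current bs qB cf = none) ∨
      (∃ qA' v' qB' cf', pvExpandA current dirs bs qA v = some (qA', v') ∧
        pvExpandB start current bs qB cf = some (qB', cf') ∧
        qA'.map Prod.fst = qB' ∧
        (∀ s, s ∈ v' ↔ (s = start ∨ cf'.contains s = true)) ∧
        (∀ sp ∈ qA', pvReconOK start cf' sp.1 sp.2)) := by
  intro bs
  induction bs with
  | nil =>
    intro qA v qB cf h1 h2 h3 _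
    exact Or.inr ⟨qA, v, qB, cf, rfl, rfl, h1, h2, h3⟩
  | cons b rest ih =>
    intro qA v qB cf h1 h2 h3 h4
    rw [pvExpandA, pvExpandB,
      show (b.foldl (fun acc item => acc.bind (fun st =>
          match PySem.List.pyGet? st item with
          | none => none
          | some v => PySem.List.pySet? st item (if v = 0 then 1 else 0))) (some current))
        = pvToggleA current b from rfl]
    cases ht : pvToggleA current b with
    | none => left; constructor <;> rfl
    | some nb =>
      by_cases hmem : nb ∈ v
      · have hcond : nb = start ∨ cf.contains nb = true := (h2 nb).1 hmem
        simp only [if_pos hmem, if_pos hcond]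
        exact ih qA v qB cf h1 h2 h3 h4
      · have hcond : ¬(nb = start ∨ cf.contains nb = true) := fun hc => hmem ((h2 nb).2 hc)
        have hns : nb ≠ start := fun e => hcond (Or.inl e)
        have hnb : cf.contains nb = false := by
          cases hcb : cf.contains nb with
          | false => rfl
          | true => exact absurd (Or.inr hcb) hcond
        simp only [if_neg hmem, if_neg hcond]
        apply ih
        · simp [h1]
        · intro s
          rw [PySem.Set.mem_add]
          simp only [PySem.Dict.contains_insert]
          constructor
          · rintro (hs | rfl)
            · rcases (h2 s).1 hs with h | h
              · exact Or.inl h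
              · exact Or.inr (by simp [h])
            · exact Or.inr (by simp)
          · rintro (rfl | hb)
            · exact Or.inl ((h2 s).2 (Or.inl rfl))
            · rcases Bool.or_eq_true_iff.1 hb with h | h
              · exact Or.inr (by simpa using h)
              · exact Or.inl ((h2 s).2 (Or.inr h))
        · intro sp hsp
          rcases List.mem_append.1 hsp with h | h
          · exact pvReconOK_insert start nb (current, b) cf hnb sp.1 sp.2 (h3 sp h)
          · have : sp = (nb, dirs ++ [b]) := by simpa using h
            subst this
            exact pvReconOK_new start nb current b cf hnb hns dirs h4
        · exact pvReconOK_insert start nb (current, b) cf hnb current dirs h4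

theorem pvLoop_lock (start goal : List Int) (buttons : List (List Int)) :
    ∀ (f : Nat) (qA : List (List Int × List (List Int))) (v : PySem.Set (List Int))
      (qB : List (List Int)) (cf : PySem.Dict (List Int) (List Int × List Int)),
      qA.map Prod.fst = qB →
      (∀ s, s ∈ v ↔ (s = start ∨ cf.contains s = true)) →
      (∀ sp ∈ qA, pvReconOK start cf sp.1 sp.2) →
      pvLoopA goal buttons f qA v = pvLoopB start goal buttons f qB cf := by
  intro f
  induction f with
  | zero => intro qA v qB cf _ _ _; rfl
  | succ f ih =>
    intro qA v qB cf h1 h2 h3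
    cases qA with
    | nil =>
      have : qB = [] := by simpa using h1.symm
      subst this; rfl
    | cons hd rest =>
      obtain ⟨current, dirs⟩ := hd
      subst h1
      rw [List.map_cons]
      rw [pvLoopA, pvLoopB]
      by_cases hg : current = goal
      · rw [if_pos hg, if_pos hg, h3 (current, dirs) List.mem_cons_self []]
        simp
      · rw [if_neg hg, if_neg hg]
        rcases pvExpand_lock start current dirs buttons rest v (rest.map Prod.fst) cf rfl h2
          (fun sp hsp => h3 sp (List.mem_cons_of_mem _ hsp))
          (h3 (current, dirs) List.mem_cons_self) with
          ⟨hA, hB⟩ | ⟨qA', v', qB', cf', eA, eB, i1, i2, i3⟩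
        · rw [hA, hB]
        · rw [eA, eB]
          exact ih qA' v' qB' cf' i1 i2 i3

-- ===== VERDICT (by name: the statement is the Claim_ definition above) =====
theorem bfs_spec : Claim_equal_bfs := by
  intro start goal buttons _ _
  unfold Spec_bfs bfs bfs_alt
  apply pvLoop_lock
  · rfl
  · intro s
    simp [PySem.Set.add, PySem.Set.empty, PySem.Set.contains, PySem.Dict.contains_empty, eq_comm]
  · intro sp hsp
    simp at hsp
    subst hsp
    exact pvReconOK_start start _
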